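-- pv_equiv track=rewrite | github.com/lucasportella/Trybe | exercises/module4/estrutura-de-dados/hashmaps/exercises/ex1-v2.py | fit_word
-- ===== SOURCE A (Python) =====
-- def fit_word(array, word):
--     sum = ''
--     dict = {}
--     for l in word:
--         if l not in dict:
--             dict[l] = 1
--         else:
--             dict[l] += 1
--
--     for w in array:
--         temp_dict = {}
--         temp_sum = ''
--         for l in w:
--             if l in dict:
--                 if l not in temp_dict:
--                     temp_dict[l] = 1
--                     temp_sum += l
--                 else:
--                     temp_dict[l] +=1
--                     temp_sum += l
--                     if temp_dict[l] > dict[l]: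
--                         temp_sum = ''
--                         break
--             else:
--                 temp_sum = ''
--                 break
--         sum += temp_sum
--
--     return len(sum)
-- ===== SOURCE B (Python) =====
-- def fit_word(array, word):
--     budget = sorted(word)
--
--     def covered(need, avail):
--         # need, avail sorted ascending; True iff need is a sub-multiset of avail
--         i, j = 0, 0
--         while True:
--             if i >= len(need):
--                 return True
--             if j >= len(avail):
--                 return False
--             if need[i] == avail[j]:
--                 i += 1
--                 j += 1
--             elif avail[j] < need[i]:
--                 # binary search: first position after j holding a char >= need[i]
--                 lo, hi = j + 1, len(avail)
--                 while lo < hi: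
--                     mid = (lo + hi) // 2
--                     if avail[mid] < need[i]:
--                         lo = mid + 1
--                     else:
--                         hi = mid
--                 j = lo
--             else:
--                 return False
--
--     return sum(len(w) for w in array if covered(sorted(w), budget))
-- ===== Notes on version B (the rewrite author's own statement) =====
-- stated objective: alternative
-- what changed: A decides fit by a hash-table (dict) letter-count scan with incremental increments and early break; B sorts the characters of word once and of each candidate and decides fit by a two-pointer merge scan over the two sorted sequences (sub-multiset = ordered sub-merge), galloping over budget gaps with a binary search, and sums the lengths of the fitting words.
import Mathlib
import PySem

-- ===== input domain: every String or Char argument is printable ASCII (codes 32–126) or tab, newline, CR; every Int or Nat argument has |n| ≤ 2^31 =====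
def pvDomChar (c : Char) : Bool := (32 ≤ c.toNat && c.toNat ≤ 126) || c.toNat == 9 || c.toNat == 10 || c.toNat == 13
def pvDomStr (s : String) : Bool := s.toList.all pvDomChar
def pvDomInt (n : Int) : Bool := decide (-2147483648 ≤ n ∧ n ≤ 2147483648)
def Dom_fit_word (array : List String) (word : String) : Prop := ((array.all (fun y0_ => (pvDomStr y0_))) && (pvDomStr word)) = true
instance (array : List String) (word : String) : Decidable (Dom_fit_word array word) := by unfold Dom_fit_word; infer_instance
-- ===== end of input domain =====

-- B replaces A's dict letter-count scan with sort-then-two-pointer merge inclusion (objective: alternative).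

-- ===== PORT A =====
-- the first loop of A: build dict of word's letter counts
def pvA_build (cs : List Char) : PySem.Dict Char Int :=
  cs.foldl (fun d l => if d.contains l = false then d.insert l 1 else d.insert l (d.getD l 0 + 1)) .empty

-- A's inner 'for l in w' loop, with its two break points returning '' (= [])
def pvA_inner (base : PySem.Dict Char Int) :
    List Char → PySem.Dict Char Int → List Char → List Char
  | [], _, ts => ts
  | l :: rest, td, ts =>
    if base.contains l then
      if td.contains l = false then
        pvA_inner base rest (td.insert l 1) (ts ++ [l])
      else
        if (td.insert l (td.getD l 0 + 1)).getD l 0 > base.getD l 0 then []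
        else pvA_inner base rest (td.insert l (td.getD l 0 + 1)) (ts ++ [l])
    else []

def fit_word (array : List String) (word : String) : Int :=
  let d := pvA_build word.toList
  let sum := array.foldl (fun s w => s ++ pvA_inner d w.toList .empty []) ([] : List Char)
  (sum.length : Int)

-- ===== PORT B =====
-- Source B's inner 'while lo < hi' binary search: first position in [lo, hi) holding a char >= x (else hi);
-- the loop runs at most hi - lo times, transcribed as structural recursion on that fuel
def pvLowerGo (avail : List Char) (x : Char) : Nat → Nat → Nat → Nat
  | 0, lo, _ => lo
  | fuel + 1, lo, hi =>
    if lo < hi then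
      if avail.getD ((lo + hi) / 2) 'a' < x then pvLowerGo avail x fuel ((lo + hi) / 2 + 1) hi
      else pvLowerGo avail x fuel lo ((lo + hi) / 2)
    else lo

def pvLower (avail : List Char) (x : Char) (lo hi : Nat) : Nat :=
  pvLowerGo avail x (hi - lo) lo hi

-- Source B's 'while True' two-pointer loop of 'covered', with the binary-search skip;
-- each iteration shrinks (|need| - i) + (|avail| - j), transcribed as structural recursion on that fuel
def pvScanGo (need avail : List Char) : Nat → Nat → Nat → Bool
  | 0, _, _ => false
  | fuel + 1, i, j =>
    if need.length ≤ i then true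
    else if avail.length ≤ j then false
    else if need.getD i 'a' = avail.getD j 'a' then pvScanGo need avail fuel (i + 1) (j + 1)
    else if avail.getD j 'a' < need.getD i 'a' then
      pvScanGo need avail fuel i (pvLower avail (need.getD i 'a') (j + 1) avail.length)
    else false

def pvScanB (need avail : List Char) (i j : Nat) : Bool :=
  pvScanGo need avail (need.length - i + (avail.length - j) + 1) i j

def fit_word_alt (array : List String) (word : String) : Int :=
  let budget := PySem.List.sorted word.toList (fun c => c) false
  -- sum(len(w) for w in array if covered(sorted(w), budget))
  array.foldl (fun total w =>
    if pvScanB (PySem.List.sorted w.toList (fun c => c) false) budget 0 0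
    then total + (w.toList.length : Int) else total) 0

-- ===== PRECONDITION & SPEC =====
def Spec_fit_word (array : List String) (word : String) (out : Int) : Prop := out = fit_word_alt array word
instance (array : List String) (word : String) (out : Int) : Decidable (Spec_fit_word array word out) := by unfold Spec_fit_word; infer_instance

-- ===== CLAIM (what is proved, stated in full; the proofs are below) =====
def Claim_equal_fit_word : Prop := ∀ (array : List String) (word : String), Dom_fit_word array word → Spec_fit_word array word (fit_word array word)

-- ===== LEMMAS AND PROOFS =====

-- "w's letters fit within W's letter budget"
def pvFits (W w : List Char) : Bool := decide (∀ ch ∈ w, w.count ch ≤ W.count ch)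

-- linear two-pointer merge scan (proof-side model of pvScanB; pvScanB = this with skips)
def pvCovered : List Char → List Char → Bool
  | [], _ => true
  | _ :: _, [] => false
  | a :: as, c :: cs =>
    if a = c then pvCovered as cs
    else if c < a then pvCovered (a :: as) cs
    else false
  termination_by _ b => b.length

theorem pvA_build_eq_counter (cs : List Char) : pvA_build cs = PySem.Dict.counter cs := by
  rw [← PySem.Dict.foldl_insert_getD_add_one_eq_counter cs]
  unfold pvA_build
  apply PySem.List.foldl_congr_mem
  intro d l _
  by_cases h : d.contains l = false
  · simp [h, PySem.Dict.getD_of_not_contains d 0 h]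
  · simp [h]

theorem pvA_inner_spec (W : List Char) :
    ∀ (rest p : List Char) (td : PySem.Dict Char Int) (ts : List Char),
    (∀ ch, td.getD ch 0 = (p.count ch : Int)) →
    (∀ ch, td.contains ch = decide (ch ∈ p)) →
    (∀ ch, p.count ch ≤ W.count ch) →
    pvA_inner (PySem.Dict.counter W) rest td ts =
      if pvFits W (p ++ rest) then ts ++ rest else [] := by
  intro rest
  induction rest with
  | nil =>
    intro p td ts hg hc hfit
    simp only [pvA_inner, List.append_nil, pvFits]
    rw [if_pos]
    exact decide_eq_true (fun ch _ => hfit ch)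
  | cons l rest ih =>
    intro p td ts hg hc hfit
    simp only [pvA_inner]
    by_cases hW : l ∈ W
    · rw [if_pos (by simp [PySem.Dict.contains_counter, hW])]
      by_cases hp : l ∈ p
      · -- l already in temp_dict
        rw [hc l, if_neg (by simp [hp])]
        by_cases hover : (p.count l : Int) + 1 > (W.count l : Int)
        · rw [if_pos (by simpa [PySem.Dict.getD_insert_self, PySem.Dict.getD_counter, hg l]
            using hover)]
          have hno : ¬ (∀ ch ∈ p ++ l :: rest, (p ++ l :: rest).count ch ≤ W.count ch) := by
            intro hall
            have h1 := hall l (by simp)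
            have hcnt : p.count l + 1 ≤ (p ++ l :: rest).count l := by
              simp [List.count_append]
            have : (p.count l : Int) + 1 ≤ (W.count l : Int) := by exact_mod_cast le_trans hcnt h1
            omega
          rw [if_neg (by simpa [pvFits] using hno)]
        · rw [if_neg (by simpa [PySem.Dict.getD_insert_self, PySem.Dict.getD_counter, hg l]
            using hover)]
          have step := ih (p ++ [l]) (td.insert l (td.getD l 0 + 1)) (ts ++ [l])
            (fun ch => by
              rw [PySem.Dict.getD_insert]
              by_cases h : ch = l
              · subst h
                simp [hg, List.count_append]
              · have hz : List.count ch [l] = 0 :=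
                  List.count_eq_zero_of_not_mem (by simp [h])
                simp [h, hg, List.count_append, hz])
            (fun ch => by
              rw [PySem.Dict.contains_insert, hc]
              by_cases h : ch = l <;> simp [h])
            (fun ch => by
              by_cases h : ch = l
              · subst h
                have : (p.count ch : Int) + 1 ≤ (W.count ch : Int) := by omega
                have := this
                simp [List.count_append]
                exact_mod_cast ‹(p.count ch : Int) + 1 ≤ (W.count ch : Int)›
              · have hz : List.count ch [l] = 0 :=
                  List.count_eq_zero_of_not_mem (by simp [h])
                simp [List.count_append, hz]
                exact hfit ch)
          rw [step]
          simp [List.append_assoc]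
      · -- l fresh in temp_dict
        rw [hc l, if_pos (by simp [hp])]
        have step := ih (p ++ [l]) (td.insert l 1) (ts ++ [l])
          (fun ch => by
            rw [PySem.Dict.getD_insert]
            by_cases h : ch = l
            · subst h
              simp [List.count_append, List.count_eq_zero_of_not_mem hp]
            · have hz : List.count ch [l] = 0 :=
                List.count_eq_zero_of_not_mem (by simp [h])
              simp [h, hg, List.count_append, hz])
          (fun ch => by
            rw [PySem.Dict.contains_insert, hc]
            by_cases h : ch = l <;> simp [h])
          (fun ch => by
            by_cases h : ch = l
            · subst h
              simp [List.count_append, List.count_eq_zero_of_not_mem hp]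
              exact hW
            · have hz : List.count ch [l] = 0 :=
                List.count_eq_zero_of_not_mem (by simp [h])
              simp [List.count_append, hz]
              exact hfit ch)
        rw [step]
        simp [List.append_assoc]
    · rw [if_neg (by simp [PySem.Dict.contains_counter, hW])]
      have hno : ¬ (∀ ch ∈ p ++ l :: rest, (p ++ l :: rest).count ch ≤ W.count ch) := by
        intro hall
        have h1 := hall l (by simp)
        have h0 : W.count l = 0 := List.count_eq_zero_of_not_mem hW
        have h2 : 0 < (p ++ l :: rest).count l := by
          simp [List.count_append]
        omega
      rw [if_neg (by simpa [pvFits] using hno)]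

theorem pvA_inner_top (W w : List Char) :
    pvA_inner (PySem.Dict.counter W) w .empty [] = if pvFits W w then w else [] := by
  have := pvA_inner_spec W w [] .empty []
    (fun ch => by simp [PySem.Dict.getD_empty])
    (fun ch => by simp [PySem.Dict.contains_empty])
    (fun ch => by simp)
  simpa using this

-- the two-pointer merge scan on sorted lists decides sub-multiset inclusion (by counts)
theorem pvCovered_iff (b : List Char) : ∀ (s : List Char),
    s.Pairwise (· ≤ ·) → b.Pairwise (· ≤ ·) →
    (pvCovered s b = true ↔ ∀ x ∈ s, s.count x ≤ b.count x) := by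
  induction b with
  | nil =>
    intro s _ _
    cases s with
    | nil => simp [pvCovered]
    | cons a as =>
      simp only [pvCovered, Bool.false_eq_true, false_iff]
      intro hall
      have := hall a (by simp)
      simp [List.count_cons_self] at this
  | cons c cs ih =>
    intro s hs hb
    rw [List.pairwise_cons] at hb
    obtain ⟨hcb, hcs⟩ := hb
    cases s with
    | nil => simp [pvCovered]
    | cons a as =>
      rw [List.pairwise_cons] at hs
      obtain ⟨has, hass⟩ := hs
      by_cases hac : a = c
      · subst hac
        simp only [pvCovered, if_true]
        rw [ih as hass hcs]
        constructor
        · intro h x hx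
          by_cases hxe : x = a
          · subst hxe
            rw [List.count_cons_self, List.count_cons_self]
            by_cases hmem : x ∈ as
            · have := h x hmem; omega
            · have h0 : as.count x = 0 := List.count_eq_zero_of_not_mem hmem
              omega
          · rcases List.mem_cons.mp hx with hxa | hxas
            · exact absurd hxa hxe
            · rw [List.count_cons_of_ne (Ne.symm hxe), List.count_cons_of_ne (Ne.symm hxe)]
              exact h x hxas
        · intro h x hx
          have := h x (List.mem_cons_of_mem _ hx)
          by_cases hxe : x = a
          · subst hxe
            rw [List.count_cons_self, List.count_cons_self] at this
            omega
          · rwa [List.count_cons_of_ne (Ne.symm hxe), List.count_cons_of_ne (Ne.symm hxe)] at this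
      · by_cases hca : c < a
        · simp only [pvCovered, if_neg hac, if_pos hca]
          rw [ih (a :: as) (List.pairwise_cons.mpr ⟨has, hass⟩) hcs]
          have hne : ∀ x ∈ a :: as, x ≠ c := by
            intro x hx
            rcases List.mem_cons.mp hx with hxa | hxas
            · subst hxa; exact fun he => absurd he.symm (ne_of_lt hca)
            · exact fun he => absurd (he ▸ has x hxas) (not_le_of_gt hca)
          constructor
          · intro h x hx
            rw [List.count_cons_of_ne (Ne.symm (hne x hx))]
            exact h x hx
          · intro h x hx
            have := h x hx
            rwa [List.count_cons_of_ne (Ne.symm (hne x hx))] at this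
        · -- a < c: first needed letter is absent from the budget
          have halt : a < c := lt_of_le_of_ne (not_lt.mp hca) hac
          simp only [pvCovered, if_neg hac, if_neg hca, Bool.false_eq_true, false_iff]
          intro hall
          have h1 := hall a (by simp)
          have hnm : a ∉ c :: cs := by
            intro hm
            rcases List.mem_cons.mp hm with hma | hmcs
            · exact absurd hma (ne_of_lt halt)
            · exact absurd (hcb a hmcs) (not_le_of_gt halt)
          have h0 : (c :: cs).count a = 0 := List.count_eq_zero_of_not_mem hnm
          rw [List.count_cons_self, h0] at h1
          omega

-- B's sorted-merge test equals pvFits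
theorem pvB_test_eq (W w : List Char) :
    pvCovered (PySem.List.sorted w (fun c => c) false)
      (PySem.List.sorted W (fun c => c) false) = pvFits W w := by
  have hs : (PySem.List.sorted w (fun c => c) false).Pairwise (· ≤ ·) :=
    PySem.List.sorted_pairwise w (fun c => c)
  have hb : (PySem.List.sorted W (fun c => c) false).Pairwise (· ≤ ·) :=
    PySem.List.sorted_pairwise W (fun c => c)
  have hpw : (PySem.List.sorted w (fun c => c) false).Perm w := PySem.List.sorted_perm w _ _
  have hpW : (PySem.List.sorted W (fun c => c) false).Perm W := PySem.List.sorted_perm W _ _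
  rw [Bool.eq_iff_iff, pvCovered_iff _ _ hs hb]
  simp only [pvFits, decide_eq_true_eq]
  constructor
  · intro h x hx
    have := h x (hpw.mem_iff.mpr hx)
    rwa [hpw.count_eq, hpW.count_eq] at this
  · intro h x hx
    rw [hpw.count_eq, hpW.count_eq]
    exact h x (hpw.mem_iff.mp hx)

theorem pv_fold_len (W : List Char) :
    ∀ (arr : List String) (s : List Char) (t : Int), t = (s.length : Int) →
    ((arr.foldl (fun s w => s ++ (if pvFits W w.toList then w.toList else [])) s).length : Int) =
      arr.foldl (fun t w => if pvFits W w.toList then t + (w.toList.length : Int) else t) t := by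
  intro arr
  induction arr with
  | nil => intro s t ht; simp [ht]
  | cons w arr ih =>
    intro s t ht
    simp only [List.foldl_cons]
    by_cases h : pvFits W w.toList = true
    · rw [if_pos h, if_pos h]
      exact ih _ _ (by simp [ht])
    · rw [if_neg h, if_neg h]
      exact ih _ _ (by simp [ht])

-- the binary search never returns below lo
theorem pvLowerGo_ge (avail : List Char) (x : Char) :
    ∀ (fuel lo hi : Nat), lo ≤ pvLowerGo avail x fuel lo hi := by
  intro fuel
  induction fuel with
  | zero => intro lo hi; simp [pvLowerGo]
  | succ f ih =>
    intro lo hi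
    simp only [pvLowerGo]
    split_ifs with h1 h2
    · exact le_trans (by omega) (ih ((lo + hi) / 2 + 1) hi)
    · exact ih lo ((lo + hi) / 2)
    · exact le_refl lo

-- nor above hi (when lo ≤ hi)
theorem pvLowerGo_le (avail : List Char) (x : Char) :
    ∀ (fuel lo hi : Nat), lo ≤ hi → pvLowerGo avail x fuel lo hi ≤ hi := by
  intro fuel
  induction fuel with
  | zero => intro lo hi h; simpa [pvLowerGo] using h
  | succ f ih =>
    intro lo hi h
    simp only [pvLowerGo]
    split_ifs with h1 h2
    · exact ih ((lo + hi) / 2 + 1) hi (by omega)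
    · exact le_trans (ih lo ((lo + hi) / 2) (by omega)) (by omega)
    · exact h

-- every position the binary search skips holds a char < x (sorted list)
theorem pvLowerGo_skipped (avail : List Char) (x : Char)
    (hs : avail.Pairwise (· ≤ ·)) : ∀ (fuel lo hi : Nat), hi ≤ avail.length →
    ∀ (m : Nat) (hm : m < avail.length), lo ≤ m → m < pvLowerGo avail x fuel lo hi →
    avail[m] < x := by
  intro fuel
  induction fuel with
  | zero =>
    intro lo hi _ m _ hlo hup
    simp only [pvLowerGo] at hup
    omega
  | succ f ih =>
    intro lo hi hhi m hm hlo hup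
    simp only [pvLowerGo] at hup
    split_ifs at hup with h1 h2
    · by_cases hmid : (lo + hi) / 2 + 1 ≤ m
      · exact ih ((lo + hi) / 2 + 1) hi hhi m hm hmid hup
      · have hmidlt : (lo + hi) / 2 < avail.length := by omega
        have hx : avail[(lo + hi) / 2] < x := by
          rwa [List.getD_eq_getElem avail 'a' hmidlt] at h2
        by_cases he : m = (lo + hi) / 2
        · subst he; exact hx
        · exact lt_of_le_of_lt
            ((List.pairwise_iff_getElem.mp hs) m ((lo + hi) / 2) hm hmidlt (by omega)) hx
    · exact ih lo ((lo + hi) / 2) (by omega) m hm hlo hup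
    · omega

-- prepending chars smaller than the first needed char never changes the linear scan
theorem pvCovered_prefix_lt (a : Char) (as : List Char) :
    ∀ (pre rest : List Char), (∀ c ∈ pre, c < a) →
    pvCovered (a :: as) (pre ++ rest) = pvCovered (a :: as) rest := by
  intro pre
  induction pre with
  | nil => intro rest _; rfl
  | cons c pre ih =>
    intro rest hlt
    have hca : c < a := hlt c (by simp)
    simp only [List.cons_append, pvCovered, if_neg (ne_of_gt hca), if_pos hca]
    exact ih rest (fun d hd => hlt d (by simp [hd]))

-- the galloping scan equals the linear merge scan on the dropped suffixes
theorem pvScanGo_eq_covered (need avail : List Char) (hs : avail.Pairwise (· ≤ ·)) :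
    ∀ (fuel i j : Nat), j ≤ avail.length →
    need.length - i + (avail.length - j) < fuel →
    pvScanGo need avail fuel i j = pvCovered (need.drop i) (avail.drop j) := by
  intro fuel
  induction fuel with
  | zero => intro i j _ hf; omega
  | succ f ih =>
    intro i j hjle hf
    simp only [pvScanGo]
    by_cases hi : need.length ≤ i
    · rw [if_pos hi, List.drop_eq_nil_of_le hi]
      simp [pvCovered]
    · rw [if_neg hi]
      have hi' : i < need.length := by omega
      by_cases hj : avail.length ≤ j
      · obtain ⟨c, cs, hcons⟩ : ∃ c cs, need.drop i = c :: cs := by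
          cases h : need.drop i with
          | nil =>
            exfalso
            have := List.drop_eq_nil_iff.mp h
            omega
          | cons c cs => exact ⟨c, cs, rfl⟩
        rw [if_pos hj, List.drop_eq_nil_of_le hj, hcons]
        simp [pvCovered]
      · rw [if_neg hj]
        have hj' : j < avail.length := by omega
        by_cases heq : need.getD i 'a' = avail.getD j 'a'
        · rw [if_pos heq, ih (i + 1) (j + 1) (by omega) (by omega),
            List.drop_eq_getElem_cons (l := need) hi',
            List.drop_eq_getElem_cons (l := avail) hj']
          rw [List.getD_eq_getElem need 'a' hi', List.getD_eq_getElem avail 'a' hj'] at heq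
          simp only [pvCovered, if_pos heq]
        · rw [if_neg heq]
          by_cases hlt : avail.getD j 'a' < need.getD i 'a'
          · rw [if_pos hlt]
            rw [List.getD_eq_getElem need 'a' hi'] at *
            rw [List.getD_eq_getElem avail 'a' hj'] at heq hlt
            have hk1 : j + 1 ≤ pvLower avail need[i] (j + 1) avail.length :=
              pvLowerGo_ge avail need[i] _ (j + 1) avail.length
            have hk2 : pvLower avail need[i] (j + 1) avail.length ≤ avail.length :=
              pvLowerGo_le avail need[i] _ (j + 1) avail.length (by omega)
            rw [ih i (pvLower avail need[i] (j + 1) avail.length) hk2 (by omega)]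
            rw [List.drop_eq_getElem_cons (l := need) hi',
              List.drop_eq_getElem_cons (l := avail) hj']
            simp only [pvCovered, if_neg (Ne.symm (ne_of_lt hlt)), if_pos hlt]
            -- the stretch from j+1 up to the binary search's result holds only chars < need[i]; peel it off
            have hsplit : avail.drop (j + 1) =
                ((avail.drop (j + 1)).take (pvLower avail need[i] (j + 1) avail.length - (j + 1)))
                  ++ avail.drop (pvLower avail need[i] (j + 1) avail.length) := by
              have h1 := List.take_append_drop
                (pvLower avail need[i] (j + 1) avail.length - (j + 1)) (avail.drop (j + 1))
              rw [List.drop_drop] at h1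
              have h2 : j + 1 + (pvLower avail need[i] (j + 1) avail.length - (j + 1)) =
                  pvLower avail need[i] (j + 1) avail.length := by omega
              rw [h2] at h1
              exact h1.symm
            rw [hsplit, pvCovered_prefix_lt]
            intro c hc
            rw [List.mem_iff_getElem] at hc
            obtain ⟨m, hm, hceq⟩ := hc
            rw [List.length_take, List.length_drop] at hm
            have hmlen : m < (avail.drop (j + 1)).length := by
              rw [List.length_drop]
              omega
            rw [List.getElem_take, List.getElem_drop] at hceq
            have hmk : j + 1 + m < pvLower avail need[i] (j + 1) avail.length := by omega
            have hsk := pvLowerGo_skipped avail need[i] hs _ (j + 1) avail.length le_rfl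
              (j + 1 + m) (by omega) (by omega) hmk
            rw [← hceq]
            exact hsk
          · rw [if_neg hlt]
            rw [List.drop_eq_getElem_cons (l := need) hi',
              List.drop_eq_getElem_cons (l := avail) hj']
            rw [List.getD_eq_getElem need 'a' hi', List.getD_eq_getElem avail 'a' hj'] at heq hlt
            simp only [pvCovered, if_neg heq, if_neg hlt]

theorem pvScanB_eq_covered (need avail : List Char) (hs : avail.Pairwise (· ≤ ·)) :
    pvScanB need avail 0 0 = pvCovered need avail := by
  unfold pvScanB
  rw [pvScanGo_eq_covered need avail hs _ 0 0 (by omega) (by omega),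
    List.drop_zero, List.drop_zero]

-- ===== VERDICT (by name: the statement is the Claim_ definition above) =====
theorem fit_word_spec : Claim_equal_fit_word := by
  intro array word _
  unfold Spec_fit_word fit_word fit_word_alt
  simp only [pvA_build_eq_counter]
  have hfun : (fun (s : List Char) (w : String) =>
      s ++ pvA_inner (PySem.Dict.counter word.toList) w.toList .empty []) =
      (fun s w => s ++ (if pvFits word.toList w.toList then w.toList else [])) := by
    funext s w
    rw [pvA_inner_top]
  rw [hfun, pv_fold_len word.toList array [] 0 (by simp)]
  apply PySem.List.foldl_congr_mem
  intro t w _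
  rw [pvScanB_eq_covered _ _ (PySem.List.sorted_pairwise word.toList (fun c => c)),
    pvB_test_eq]
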